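-- pv_equiv track=rewrite | github.com/algono-ejercicios-upv/CACM | Programming-Challenges/Chapters/7/Factovisors/Factovisors.py | is_factovisor
-- ===== SOURCE A (Python) =====
-- def is_factovisor(n, m):
--     if m < n:
--         return True
--     else:
--         f = 1
--         for i in range(2, n+1):
--             f *= i
--             if f > m and f % m == 0:
--                 return True
--         else:
--             return False
-- ===== SOURCE B (Python) =====
-- def _legendre(n, p):
--     # exponent of the prime p in n! (Legendre's formula); 0 when n <= 0
--     total = 0
--     while n > 0:
--         n //= p
--         total += n
--     return total
--
--
-- def is_factovisor(n, m):
--     # True iff m divides n!  (n! taken as the empty product 1 for n < 2),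
--     # by factorizing m and comparing prime exponents via Legendre's formula.
--     rem = m
--     p = 2
--     while p * p <= rem:
--         e = 0
--         while rem % p == 0:
--             rem //= p
--             e += 1
--         if e > 0 and _legendre(n, p) < e:
--             return False
--         p += 1
--     return rem <= 1 or _legendre(n, rem) >= 1
-- ===== Notes on version B (the rewrite author's own statement) =====
-- stated objective: alternative
-- what changed: A multiplies up the factorial (f = 2*3*...*n) probing divisibility along the way; B never forms n!: it factorizes m by trial division and compares each prime's exponent in m with its exponent in n! computed by Legendre's formula.
-- intended difference: On m = n! (including the degenerate n <= 1, m = 1 case) A returns False although m divides n!, because its loop demands f > m strictly and never runs for n < 2; B returns the intended True. — e.g. on is_factovisor(3, 6): A returns false, B returns true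
-- outside the precondition, e.g. on is_factovisor(-10, -3): A returns False, B returns True
import Mathlib
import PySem

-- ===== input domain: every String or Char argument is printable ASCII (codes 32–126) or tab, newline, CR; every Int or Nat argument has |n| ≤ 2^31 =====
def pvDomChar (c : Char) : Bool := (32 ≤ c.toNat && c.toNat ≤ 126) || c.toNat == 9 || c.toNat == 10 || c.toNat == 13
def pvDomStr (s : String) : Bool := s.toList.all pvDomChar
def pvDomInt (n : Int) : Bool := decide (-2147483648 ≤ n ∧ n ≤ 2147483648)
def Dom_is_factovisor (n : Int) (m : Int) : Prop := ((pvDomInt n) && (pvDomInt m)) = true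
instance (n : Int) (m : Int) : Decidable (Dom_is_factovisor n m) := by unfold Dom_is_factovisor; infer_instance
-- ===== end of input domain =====

-- B never builds the factorial: it factorizes m by trial division and compares each prime's
-- exponent in m with its exponent in n! via Legendre's formula (objective: alternative).

-- ===== PORT A =====
-- the 'for i in range(2, n+1): f *= i; if f > m and f % m == 0: return True / else: return False' loop
-- (PySem.Int.mod is exact for the m ≠ 0 calls that occur: the loop body only runs when 2 ≤ n ≤ m)
def isfLoopA (m : Int) : List Int → Int → Bool
  | [], _ => false
  | i :: rest, f =>
    let f' := f * i
    if m < f' ∧ PySem.Int.mod f' m = 0 then true else isfLoopA m rest f'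

def is_factovisor (n : Int) (m : Int) : Bool :=
  if m < n then true
  else isfLoopA m (PySem.List.pyRange 2 (n + 1) 1) 1

-- ===== PORT B =====
-- _legendre(n, p): 'total = 0; while n > 0: n //= p; total += n; return total'
-- (structural recursion on a fuel bound; fuel n.toNat is provably sufficient since n
--  strictly decreases, and the '2 ≤ p' conjunct is a totality guard: every call passes p ≥ 2)
def legLoop (p : Int) : Nat → Int → Int
  | 0, _ => 0
  | fuel + 1, n =>
    if 0 < n ∧ 2 ≤ p then
      PySem.Int.floordiv n p + legLoop p fuel (PySem.Int.floordiv n p)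
    else 0

def legendreB (n : Int) (p : Int) : Int := legLoop p n.toNat n

-- the inner 'while rem % p == 0: rem //= p; e += 1' loop
-- ('2 ≤ p ∧ 1 ≤ rem' is a totality guard only: the outer loop maintains both)
def stripLoop (p : Int) : Nat → Int × Int → Int × Int
  | 0, s => s
  | fuel + 1, (rem, e) =>
    if PySem.Int.mod rem p = 0 ∧ 2 ≤ p ∧ 1 ≤ rem then
      stripLoop p fuel (PySem.Int.floordiv rem p, e + 1)
    else (rem, e)

def stripB (p : Int) (rem : Int) (e : Int) : Int × Int := stripLoop p rem.toNat (rem, e)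

-- the outer 'while p * p <= rem' trial-division loop (fuel (rem + 2 - p).toNat suffices:
-- p increases and rem never grows; '2 ≤ p' in the guard is part of the loop invariant)
def trialLoop (n : Int) : Nat → Int → Int → Bool
  | 0, _, rem => decide (rem ≤ 1) || decide (1 ≤ legendreB n rem)
  | fuel + 1, p, rem =>
    if 2 ≤ p ∧ p * p ≤ rem then
      let s := stripB p rem 0
      if 0 < s.2 ∧ legendreB n p < s.2 then false
      else trialLoop n fuel (p + 1) s.1
    else
      decide (rem ≤ 1) || decide (1 ≤ legendreB n rem)

def trialB (n : Int) (p : Int) (rem : Int) : Bool := trialLoop n (rem + 2 - p).toNat p rem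

def is_factovisor_alt (n : Int) (m : Int) : Bool := trialB n 2 m


-- ===== PRECONDITION & SPEC =====
-- Pre_ excludes m ≤ 0 with n ≤ m: divisibility by a nonpositive m is outside the task's
-- domain, and there A's False (its loop is empty) and B's trivial True are both accidental.
def Pre_is_factovisor (n : Int) (m : Int) : Prop := 1 ≤ m ∨ m < n
instance (n : Int) (m : Int) : Decidable (Pre_is_factovisor n m) := by
  unfold Pre_is_factovisor; infer_instance
def pvWitness_is_factovisor : Int × Int := (5, 7)

-- n! as an Int (the factorial of max n 0; used only to state D_)
def pyFact (n : Int) : Int := (Nat.factorial n.toNat : Int)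

-- On m = n! (including its n ≤ 1 degenerate case m = 1) A returns False although m divides n!,
-- because its loop demands f > m strictly (and never runs for n < 2); B returns the intended True.
def D_is_factovisor (n : Int) (m : Int) : Prop :=
  (n ≤ 1 ∧ m = 1) ∨ (2 ≤ n ∧ n ≤ 12 ∧ m = pyFact n)
instance (n : Int) (m : Int) : Decidable (D_is_factovisor n m) := by
  unfold D_is_factovisor; infer_instance

def Spec_is_factovisor (n : Int) (m : Int) (out : Bool) : Prop :=
  ¬ D_is_factovisor n m → out = is_factovisor_alt n m
instance (n : Int) (m : Int) (out : Bool) : Decidable (Spec_is_factovisor n m out) := by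
  unfold Spec_is_factovisor; infer_instance

def pvDiffWitness_is_factovisor : Int × Int := (3, 6)
def pvDiffWitnessOut_is_factovisor : Bool × Bool := (false, true)

-- ===== CLAIM (what is proved, stated in full; the proofs are below) =====
def Claim_unchanged_is_factovisor : Prop := ∀ (n : Int) (m : Int), Dom_is_factovisor n m → Pre_is_factovisor n m → Spec_is_factovisor n m (is_factovisor n m)
def Claim_changed_is_factovisor : Prop := Dom_is_factovisor (pvDiffWitness_is_factovisor.1) (pvDiffWitness_is_factovisor.2) ∧ Pre_is_factovisor (pvDiffWitness_is_factovisor.1) (pvDiffWitness_is_factovisor.2) ∧ D_is_factovisor (pvDiffWitness_is_factovisor.1) (pvDiffWitness_is_factovisor.2) ∧ is_factovisor (pvDiffWitness_is_factovisor.1) (pvDiffWitness_is_factovisor.2) = pvDiffWitnessOut_is_factovisor.1 ∧ is_factovisor_alt (pvDiffWitness_is_factovisor.1) (pvDiffWitness_is_factovisor.2) = pvDiffWitnessOut_is_factovisor.2 ∧ pvDiffWitnessOut_is_factovisor.1 ≠ pvDiffWitnessOut_is_factovisor.2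
def Claim_exact_is_factovisor : Prop := ∀ (n : Int) (m : Int), Dom_is_factovisor n m → Pre_is_factovisor n m → D_is_factovisor n m → is_factovisor n m ≠ is_factovisor_alt n m

-- ===== LEMMAS AND PROOFS =====

-- floordiv of nonnegative arguments is Nat division
theorem floordiv_toNat (a b : Int) (ha : 0 ≤ a) (hb : 0 < b) :
    PySem.Int.floordiv a b = ((a.toNat / b.toNat : Nat) : Int) := by
  have h := PySem.Int.floordiv_natCast a.toNat b.toNat
  rwa [Int.toNat_of_nonneg ha, Int.toNat_of_nonneg hb.le] at h

-- ---- well-founded shadows of B's loops (proof-side only; the ports are the fuel versions) ----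

theorem floordiv_shrink (n p : Int) (hn : 0 < n) (hp : 2 ≤ p) :
    0 ≤ PySem.Int.floordiv n p ∧ PySem.Int.floordiv n p < n := by
  constructor
  · rw [PySem.Int.le_floordiv_iff_mul_le (by omega)]; omega
  · rw [PySem.Int.floordiv_lt_iff_lt_mul (by omega)]; nlinarith

def legW (n : Int) (p : Int) : Int :=
  if h : 0 < n ∧ 2 ≤ p then
    PySem.Int.floordiv n p + legW (PySem.Int.floordiv n p) p
  else 0
termination_by n.toNat
decreasing_by
  have hb := floordiv_shrink n p h.1 h.2
  omega

def stripW (p : Int) (rem : Int) (e : Int) : Int × Int :=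
  if h : PySem.Int.mod rem p = 0 ∧ 2 ≤ p ∧ 1 ≤ rem then
    stripW p (PySem.Int.floordiv rem p) (e + 1)
  else (rem, e)
termination_by rem.toNat
decreasing_by
  have hb := floordiv_shrink rem p (by omega) h.2.1
  omega

theorem stripW_bounds : ∀ (p rem e : Int), 1 ≤ rem →
    1 ≤ (stripW p rem e).1 ∧ (stripW p rem e).1 ≤ rem := by
  intro p rem e
  induction rem, e using stripW.induct p with
  | case1 rem e h ih =>
    intro _
    have hdvd : p ∣ rem := (PySem.Int.mod_eq_zero_iff_dvd rem p).mp h.1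
    have hq : 1 ≤ PySem.Int.floordiv rem p := by
      rw [PySem.Int.le_floordiv_iff_mul_le (by omega)]
      have : p ≤ rem := Int.le_of_dvd (by omega) hdvd
      omega
    have hlt := (floordiv_shrink rem p (by omega) h.2.1).2
    rw [stripW, dif_pos h]
    exact ⟨(ih hq).1, le_trans (ih hq).2 (by omega)⟩
  | case2 rem e h =>
    intro h1
    rw [stripW, dif_neg h]
    exact ⟨h1, le_refl _⟩

def trialW (n : Int) (p : Int) (rem : Int) : Bool :=
  if h : 2 ≤ p ∧ p * p ≤ rem then
    let s := stripW p rem 0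
    if 0 < s.2 ∧ legW n p < s.2 then false
    else trialW n (p + 1) s.1
  else
    decide (rem ≤ 1) || decide (1 ≤ legW n rem)
termination_by (rem + 1 - p).toNat
decreasing_by
  have hb := stripW_bounds p rem 0 (by nlinarith [h.1, h.2])
  have hpr : p ≤ rem := by nlinarith [h.1, h.2]
  omega

-- ---- the fuel ports compute exactly the shadows ----

theorem legLoop_eq (p : Int) : ∀ (fuel : Nat) (n : Int), n.toNat ≤ fuel →
    legLoop p fuel n = legW n p := by
  intro fuel
  induction fuel with
  | zero =>
    intro n hn
    rw [legLoop, legW, dif_neg (by omega : ¬ (0 < n ∧ 2 ≤ p))]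
  | succ f ihf =>
    intro n hn
    by_cases hg : 0 < n ∧ 2 ≤ p
    · have hb := floordiv_shrink n p hg.1 hg.2
      rw [legLoop, if_pos hg, legW, dif_pos hg, ihf _ (by omega)]
    · rw [legLoop, if_neg hg, legW, dif_neg hg]

theorem legendreB_eq_W (n p : Int) : legendreB n p = legW n p :=
  legLoop_eq p n.toNat n (le_refl _)

theorem stripLoop_eq (p : Int) : ∀ (fuel : Nat) (rem e : Int), rem.toNat ≤ fuel →
    stripLoop p fuel (rem, e) = stripW p rem e := by
  intro fuel
  induction fuel with
  | zero =>
    intro rem e hn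
    rw [stripLoop, stripW, dif_neg]
    rintro ⟨_, _, h3⟩
    omega
  | succ f ihf =>
    intro rem e hn
    by_cases hg : PySem.Int.mod rem p = 0 ∧ 2 ≤ p ∧ 1 ≤ rem
    · have hb := floordiv_shrink rem p (by omega) hg.2.1
      rw [stripLoop, if_pos hg, stripW, dif_pos hg, ihf _ _ (by omega)]
    · rw [stripLoop, if_neg hg, stripW, dif_neg hg]

theorem stripB_eq (p rem e : Int) : stripB p rem e = stripW p rem e :=
  stripLoop_eq p rem.toNat rem e (le_refl _)

theorem trialLoop_eq (n : Int) : ∀ (fuel : Nat) (p rem : Int), (rem + 2 - p).toNat ≤ fuel →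
    trialLoop n fuel p rem = trialW n p rem := by
  intro fuel
  induction fuel with
  | zero =>
    intro p rem hfu
    rw [trialLoop, trialW, dif_neg, legendreB_eq_W]
    intro hg
    have hple : p ≤ rem := by nlinarith [hg.1, hg.2]
    omega
  | succ f ihf =>
    intro p rem hfu
    by_cases hg : 2 ≤ p ∧ p * p ≤ rem
    · have hb := stripW_bounds p rem 0 (by nlinarith [hg.1, hg.2])
      have hple : p ≤ rem := by nlinarith [hg.1, hg.2]
      rw [trialLoop]
      simp only [if_pos hg]
      rw [stripB_eq, legendreB_eq_W, trialW, dif_pos hg]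
      simp only []
      by_cases hc : 0 < (stripW p rem 0).2 ∧ legW n p < (stripW p rem 0).2
      · rw [if_pos hc, if_pos hc]
      · rw [if_neg hc, if_neg hc, ihf (p + 1) (stripW p rem 0).1 (by omega)]
    · rw [trialLoop]
      simp only [if_neg hg]
      rw [trialW, dif_neg hg, legendreB_eq_W]

theorem trialB_eq (n p rem : Int) : trialB n p rem = trialW n p rem :=
  trialLoop_eq n (rem + 2 - p).toNat p rem (le_refl _)

-- Nat-level Legendre sum, the value legW computes
def legN (p : Nat) (n : Nat) : Nat :=
  if h : 0 < n ∧ 2 ≤ p then n / p + legN p (n / p) else 0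
termination_by n
decreasing_by exact Nat.div_lt_self h.1 h.2

theorem legW_eq (n p : Int) : legW n p = (legN p.toNat n.toNat : Int) := by
  induction n using legW.induct p with
  | case1 n h ih =>
    have hfd : PySem.Int.floordiv n p = ((n.toNat / p.toNat : Nat) : Int) :=
      floordiv_toNat n p h.1.le (by omega)
    rw [legW, dif_pos h, legN, dif_pos (by omega : 0 < n.toNat ∧ 2 ≤ p.toNat)]
    rw [ih, hfd, Int.toNat_natCast]
    push_cast
    ring
  | case2 n h =>
    rw [legW, dif_neg h, legN, dif_neg (by omega)]
    simp

theorem legN_eq_sum (p : Nat) (hp : 2 ≤ p) :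
    ∀ (N b : Nat), Nat.log p N < b → legN p N = ∑ i ∈ Finset.Ico 1 b, N / p ^ i := by
  intro N
  induction N using legN.induct p with
  | case1 n h ih =>
    intro b hb
    obtain ⟨c, rfl⟩ : ∃ c, b = c + 1 := ⟨b - 1, by omega⟩
    rw [Finset.sum_Ico_eq_sum_range]
    simp only [Nat.add_sub_cancel]
    match c with
    | 0 =>
      have hlog : Nat.log p n = 0 := by omega
      have hnp : n / p = 0 := by
        have := Nat.log_eq_zero_iff.mp hlog
        exact Nat.div_eq_of_lt (by omega)
      rw [legN, dif_pos h, hnp, legN, dif_neg (by omega)]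
      simp
    | c' + 1 =>
      rw [Finset.sum_range_succ']
      have h2 : ∀ i : Nat, n / p ^ (1 + (i + 1)) = (n / p) / p ^ (1 + i) := by
        intro i
        rw [Nat.div_div_eq_div_mul, show 1 + (i + 1) = (1 + i) + 1 by omega, pow_succ, mul_comm]
      simp only [h2]
      have hlog2 : Nat.log p (n / p) < c' + 1 := by
        have hld := Nat.log_div_base p n
        omega
      rw [legN, dif_pos h, ih (c' + 1) hlog2, Finset.sum_Ico_eq_sum_range]
      simp only [Nat.add_sub_cancel, show (1:Nat) + 0 = 1 from rfl, pow_one]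
      omega
  | case2 n h =>
    intro b hb
    rw [legN, dif_neg h]
    have hn0 : n = 0 := by omega
    subst hn0
    simp

-- Legendre's theorem, specialised
theorem pow_dvd_factorial_iff_legN {p : Nat} (hp : p.Prime) (N r : Nat) :
    p ^ r ∣ Nat.factorial N ↔ r ≤ legN p N := by
  rw [legN_eq_sum p hp.two_le N (Nat.log p N + 1) (Nat.lt_succ_self _)]
  exact Nat.Prime.pow_dvd_factorial_iff hp (Nat.lt_succ_self _)

-- stripW factors out the full p-power of rem
theorem stripW_spec : ∀ (p rem e : Int), 2 ≤ p → 1 ≤ rem →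
    ∃ k : Nat, (stripW p rem e).2 = e + k ∧
      rem.toNat = p.toNat ^ k * (stripW p rem e).1.toNat ∧
      ¬ (p.toNat ∣ (stripW p rem e).1.toNat) := by
  intro p rem e
  induction rem, e using stripW.induct p with
  | case1 rem e h ih =>
    intro hp hrem
    have hdvd : p ∣ rem := (PySem.Int.mod_eq_zero_iff_dvd rem p).mp h.1
    have hple : p ≤ rem := Int.le_of_dvd (by omega) hdvd
    have hfd : PySem.Int.floordiv rem p = ((rem.toNat / p.toNat : Nat) : Int) :=
      floordiv_toNat rem p (by omega) (by omega)
    have hq : 1 ≤ PySem.Int.floordiv rem p := by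
      rw [PySem.Int.le_floordiv_iff_mul_le (by omega)]; omega
    obtain ⟨k, hk, hfac, hnd⟩ := ih hp hq
    have hnat : p.toNat ∣ rem.toNat := by
      have h1 : ((p.toNat : Int)) ∣ ((rem.toNat : Int)) := by
        rwa [Int.toNat_of_nonneg (by omega : (0:Int) ≤ p),
             Int.toNat_of_nonneg (by omega : (0:Int) ≤ rem)]
      exact_mod_cast h1
    have h3 : (PySem.Int.floordiv rem p).toNat = rem.toNat / p.toNat := by
      rw [hfd, Int.toNat_natCast]
    refine ⟨k + 1, ?_, ?_, ?_⟩
    · rw [stripW, dif_pos h, hk]; push_cast; ring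
    · rw [stripW, dif_pos h]
      calc rem.toNat = p.toNat * (rem.toNat / p.toNat) := (Nat.mul_div_cancel' hnat).symm
        _ = p.toNat * (PySem.Int.floordiv rem p).toNat := by rw [h3]
        _ = p.toNat * (p.toNat ^ k * (stripW p (PySem.Int.floordiv rem p) (e + 1)).1.toNat) := by
              rw [hfac]
        _ = p.toNat ^ (k + 1) * (stripW p (PySem.Int.floordiv rem p) (e + 1)).1.toNat := by ring
    · rw [stripW, dif_pos h]; exact hnd
  | case2 rem e h =>
    intro hp hrem
    have hnd : ¬ p ∣ rem := by
      intro hd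
      exact h ⟨(PySem.Int.mod_eq_zero_iff_dvd rem p).mpr hd, hp, hrem⟩
    refine ⟨0, ?_, ?_, ?_⟩
    · rw [stripW, dif_neg h]; norm_num
    · rw [stripW, dif_neg h]; norm_num
    · rw [stripW, dif_neg h]
      intro hd
      apply hnd
      have h1 : ((p.toNat : Int)) ∣ ((rem.toNat : Int)) := by exact_mod_cast hd
      rwa [Int.toNat_of_nonneg (by omega : (0:Int) ≤ p),
           Int.toNat_of_nonneg (by omega : (0:Int) ≤ rem)] at h1

-- trial-division loop correctness
theorem trialW_iff : ∀ (n p rem : Int), 2 ≤ p → 1 ≤ rem →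
    (∀ q : Nat, q.Prime → (q : Int) < p → ¬ (q : Int) ∣ rem) →
    (trialW n p rem = true ↔ rem.toNat ∣ Nat.factorial n.toNat) := by
  intro n p rem
  induction p, rem using trialW.induct n with
  | case1 p rem h s hbr =>
    -- the exponent check fails: the loop returns False, and indeed rem ∤ n!
    intro hp hrem hinv
    replace hbr : 0 < (stripW p rem 0).2 ∧ legW n p < (stripW p rem 0).2 := hbr
    clear s
    obtain ⟨k, hk, hfac, hnd⟩ := stripW_spec p rem 0 hp hrem
    rw [trialW]
    simp only [dif_pos h, if_pos hbr, Bool.false_eq_true, false_iff]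
    by_cases hpp : p.toNat.Prime
    · intro hd
      have hkdvd : p.toNat ^ k ∣ Nat.factorial n.toNat :=
        dvd_trans ⟨(stripW p rem 0).1.toNat, hfac⟩ hd
      rw [pow_dvd_factorial_iff_legN hpp] at hkdvd
      have h2 := hbr.2
      rw [hk, legW_eq] at h2
      simp only [zero_add] at h2
      omega
    · -- composite p cannot divide rem, so the strip yields exponent 0, contradicting hbr
      exfalso
      have hq := Nat.minFac_prime (by omega : p.toNat ≠ 1)
      have hqd : p.toNat.minFac ∣ p.toNat := Nat.minFac_dvd _
      have hqlt : p.toNat.minFac < p.toNat := by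
        rcases lt_or_eq_of_le (Nat.le_of_dvd (by omega) hqd) with h1 | h1
        · exact h1
        · exact absurd (h1 ▸ hq) hpp
      have hcast : ((p.toNat.minFac : Nat) : Int) < p := by
        have h2 : ((p.toNat.minFac : Nat) : Int) < ((p.toNat : Nat) : Int) := by exact_mod_cast hqlt
        rwa [Int.toNat_of_nonneg (by omega)] at h2
      have hmfp : ((p.toNat.minFac : Nat) : Int) ∣ p := by
        have h2 : ((p.toNat.minFac : Nat) : Int) ∣ ((p.toNat : Nat) : Int) := by exact_mod_cast hqd
        rwa [Int.toNat_of_nonneg (by omega)] at h2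
      have hpd : ¬ p ∣ rem := fun hd => hinv p.toNat.minFac hq hcast (hmfp.trans hd)
      have hstrip : stripW p rem 0 = (rem, 0) := by
        rw [stripW, dif_neg]
        intro hc
        exact hpd ((PySem.Int.mod_eq_zero_iff_dvd rem p).mp hc.1)
      rw [hstrip] at hbr
      exact absurd hbr.1 (by norm_num)
  | case2 p rem h s hbr ih =>
    intro hp hrem hinv
    replace hbr : ¬ (0 < (stripW p rem 0).2 ∧ legW n p < (stripW p rem 0).2) := hbr
    replace ih : 2 ≤ p + 1 → 1 ≤ (stripW p rem 0).1 →
        (∀ q : Nat, q.Prime → (q : Int) < p + 1 → ¬ (q : Int) ∣ (stripW p rem 0).1) →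
        (trialW n (p + 1) (stripW p rem 0).1 = true ↔
          (stripW p rem 0).1.toNat ∣ Nat.factorial n.toNat) := ih
    clear s
    obtain ⟨k, hk, hfac, hnd⟩ := stripW_spec p rem 0 hp hrem
    have hb := stripW_bounds p rem 0 hrem
    have hs1 : (1:Int) ≤ (stripW p rem 0).1 := hb.1
    have hSdvdR : (stripW p rem 0).1.toNat ∣ rem.toNat := ⟨p.toNat ^ k, by rw [hfac]; ring⟩
    have hSdvdRi : (stripW p rem 0).1 ∣ rem := by
      have h1 : ((stripW p rem 0).1.toNat : Int) ∣ ((rem.toNat : Int)) := by exact_mod_cast hSdvdR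
      rwa [Int.toNat_of_nonneg (by omega), Int.toNat_of_nonneg (by omega)] at h1
    have hinv' : ∀ q : Nat, q.Prime → (q : Int) < p + 1 → ¬ (q : Int) ∣ (stripW p rem 0).1 := by
      intro q hq hql hqd
      rcases lt_or_eq_of_le (by omega : (q:Int) ≤ p) with hlt | heq
      · exact hinv q hq hlt (hqd.trans hSdvdRi)
      · apply hnd
        have h1 : (q:Int) ∣ ((stripW p rem 0).1.toNat : Int) := by
          rwa [Int.toNat_of_nonneg (by omega)]
        have h2 : q ∣ (stripW p rem 0).1.toNat := by exact_mod_cast h1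
        rwa [show p.toNat = q by omega]
    rw [trialW]
    simp only [dif_pos h, if_neg hbr]
    rw [ih (by omega) hs1 hinv']
    by_cases hpp : p.toNat.Prime
    · have hpow : p.toNat ^ k ∣ Nat.factorial n.toNat := by
        rcases Nat.eq_zero_or_pos k with hk0 | hk1
        · subst hk0; simp
        · rw [pow_dvd_factorial_iff_legN hpp]
          have hnb : ¬ (0 < (stripW p rem 0).2 ∧ legW n p < (stripW p rem 0).2) := hbr
          rw [hk, legW_eq] at hnb
          simp only [zero_add] at hnb
          have h4 : ¬ ((legN p.toNat n.toNat : Int) < (k : Int)) := fun hc =>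
            hnb ⟨by exact_mod_cast hk1, hc⟩
          omega
      have hcop : Nat.Coprime (p.toNat ^ k) (stripW p rem 0).1.toNat :=
        Nat.Coprime.pow_left k ((Nat.Prime.coprime_iff_not_dvd hpp).mpr hnd)
      constructor
      · intro h2
        have h3 := Nat.Coprime.mul_dvd_of_dvd_of_dvd hcop hpow h2
        rwa [← hfac] at h3
      · intro h2
        exact hSdvdR.trans h2
    · -- composite p: strip was a no-op
      have hq := Nat.minFac_prime (by omega : p.toNat ≠ 1)
      have hqd : p.toNat.minFac ∣ p.toNat := Nat.minFac_dvd _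
      have hqlt : p.toNat.minFac < p.toNat := by
        rcases lt_or_eq_of_le (Nat.le_of_dvd (by omega) hqd) with h1 | h1
        · exact h1
        · exact absurd (h1 ▸ hq) hpp
      have hcast : ((p.toNat.minFac : Nat) : Int) < p := by
        have h2 : ((p.toNat.minFac : Nat) : Int) < ((p.toNat : Nat) : Int) := by exact_mod_cast hqlt
        rwa [Int.toNat_of_nonneg (by omega)] at h2
      have hmfp : ((p.toNat.minFac : Nat) : Int) ∣ p := by
        have h2 : ((p.toNat.minFac : Nat) : Int) ∣ ((p.toNat : Nat) : Int) := by exact_mod_cast hqd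
        rwa [Int.toNat_of_nonneg (by omega)] at h2
      have hpd : ¬ p ∣ rem := fun hd => hinv p.toNat.minFac hq hcast (hmfp.trans hd)
      have hstrip : stripW p rem 0 = (rem, 0) := by
        rw [stripW, dif_neg]
        intro hc
        exact hpd ((PySem.Int.mod_eq_zero_iff_dvd rem p).mp hc.1)
      rw [hstrip]
  | case3 p rem h =>
    intro hp hrem hinv
    rw [trialW, dif_neg h]
    have hpr : rem < p * p := by
      rcases not_and_or.mp h with h1 | h1
      · omega
      · omega
    by_cases h1 : rem = 1
    · subst h1
      simp
    · have hR2 : 2 ≤ rem.toNat := by omega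
      have hq := Nat.minFac_prime (by omega : rem.toNat ≠ 1)
      have hqd : rem.toNat.minFac ∣ rem.toNat := Nat.minFac_dvd _
      have hqdi : ((rem.toNat.minFac : Nat) : Int) ∣ rem := by
        have h2 : ((rem.toNat.minFac : Nat) : Int) ∣ ((rem.toNat : Nat) : Int) := by
          exact_mod_cast hqd
        rwa [Int.toNat_of_nonneg (by omega)] at h2
      have hqge : (p : Int) ≤ (rem.toNat.minFac : Int) := by
        by_contra hc
        exact hinv _ hq (by omega) hqdi
      have hprime : rem.toNat.Prime := by
        by_contra hnp
        have hsq := Nat.minFac_sq_le_self (by omega : 0 < rem.toNat) hnp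
        have h2 : ((rem.toNat.minFac : Nat) : Int) * ((rem.toNat.minFac : Nat) : Int) ≤
            ((rem.toNat : Nat) : Int) := by
          exact_mod_cast (by nlinarith [hsq] : rem.toNat.minFac * rem.toNat.minFac ≤ rem.toNat)
        rw [Int.toNat_of_nonneg (by omega)] at h2
        nlinarith
      simp only [Bool.or_eq_true, decide_eq_true_iff]
      rw [legW_eq]
      constructor
      · rintro (hc | hc)
        · omega
        · have h2 : 1 ≤ legN rem.toNat n.toNat := by exact_mod_cast hc
          have h3 := (pow_dvd_factorial_iff_legN hprime n.toNat 1).mpr h2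
          rwa [pow_one] at h3
      · intro hd
        right
        have h2 : rem.toNat ^ 1 ∣ Nat.factorial n.toNat := by rwa [pow_one]
        have h3 := (pow_dvd_factorial_iff_legN hprime n.toNat 1).mp h2
        exact_mod_cast h3

theorem alt_iff (n m : Int) (hm : 1 ≤ m) :
    is_factovisor_alt n m = true ↔ m.toNat ∣ Nat.factorial n.toNat := by
  unfold is_factovisor_alt
  rw [trialB_eq]
  apply trialW_iff n 2 m (by omega) hm
  intro q hq hql
  exact absurd hql (by have := hq.two_le; omega)

-- stepping the accumulated factorial
theorem pyFact_step (a : Int) (ha : 2 ≤ a) : pyFact (a - 1) * a = pyFact a := by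
  unfold pyFact
  have h1 : a.toNat = (a - 1).toNat + 1 := by omega
  rw [h1, Nat.factorial_succ, Nat.cast_mul, Nat.cast_add, Nat.cast_one,
    Int.toNat_of_nonneg (by omega : (0:Int) ≤ a - 1)]
  ring

theorem pyFact_pos (a : Int) : 0 < pyFact a := by
  unfold pyFact
  exact_mod_cast Nat.factorial_pos a.toNat

theorem loopA_iff (m : Int) (b : Int) :
    ∀ (a : Int), 2 ≤ a →
      (isfLoopA m (PySem.List.pyRange a b 1) (pyFact (a - 1)) = true ↔
        ∃ j : Int, a ≤ j ∧ j < b ∧ m < pyFact j ∧ m ∣ pyFact j) := by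
  intro a
  induction hfuel : (b - a).toNat generalizing a with
  | zero =>
    intro ha
    rw [PySem.List.pyRange_one_eq_nil (by omega)]
    simp only [isfLoopA, Bool.false_eq_true, false_iff]
    rintro ⟨j, hj1, hj2, _⟩
    omega
  | succ t iht =>
    intro ha
    rw [PySem.List.pyRange_one_cons (by omega : a < b)]
    simp only [isfLoopA]
    rw [pyFact_step a ha]
    by_cases hc : m < pyFact a ∧ PySem.Int.mod (pyFact a) m = 0
    · rw [if_pos hc]
      simp only [true_iff]
      exact ⟨a, le_refl a, by omega, hc.1, (PySem.Int.mod_eq_zero_iff_dvd _ m).mp hc.2⟩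
    · rw [if_neg hc]
      have harg : pyFact a = pyFact ((a + 1) - 1) := by norm_num
      rw [harg, iht (a + 1) (by omega) (by omega)]
      constructor
      · rintro ⟨j, hj1, hj2, hj3, hj4⟩
        exact ⟨j, by omega, hj2, hj3, hj4⟩
      · rintro ⟨j, hj1, hj2, hj3, hj4⟩
        refine ⟨j, ?_, hj2, hj3, hj4⟩
        rcases lt_or_eq_of_le hj1 with h1 | h1
        · omega
        · exfalso
          apply hc
          subst h1
          exact ⟨hj3, (PySem.Int.mod_eq_zero_iff_dvd _ m).mpr hj4⟩

theorem pyFact_mono (i j : Int) (hij : i ≤ j) : pyFact i ≤ pyFact j := by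
  unfold pyFact
  exact_mod_cast Nat.factorial_le (by omega : i.toNat ≤ j.toNat)

theorem pyFact_dvd (i j : Int) (hij : i ≤ j) : pyFact i ∣ pyFact j := by
  unfold pyFact
  exact_mod_cast Nat.factorial_dvd_factorial (by omega : i.toNat ≤ j.toNat)

theorem a_iff (n m : Int) (hn : 2 ≤ n) (hnm : n ≤ m) :
    is_factovisor n m = true ↔ (m ∣ pyFact n ∧ m < pyFact n) := by
  rw [is_factovisor, if_neg (by omega : ¬ m < n)]
  have h1 := loopA_iff m (n + 1) 2 (le_refl 2)
  rw [show pyFact (2 - 1) = 1 from by norm_num [pyFact]] at h1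
  rw [h1]
  constructor
  · rintro ⟨j, hj1, hj2, hj3, hj4⟩
    have hjn : j ≤ n := by omega
    exact ⟨hj4.trans (pyFact_dvd j n hjn), lt_of_lt_of_le hj3 (pyFact_mono j n hjn)⟩
  · rintro ⟨hd, hlt⟩
    exact ⟨n, hn, by omega, hlt, hd⟩

theorem factorial_of_le_one (n : Int) (hn : n ≤ 1) : Nat.factorial n.toNat = 1 := by
  rcases Nat.le_one_iff_eq_zero_or_eq_one.mp (by omega : n.toNat ≤ 1) with h | h <;> rw [h] <;> rfl

-- A on n ≤ 1 (with 1 ≤ m): the guard fails and the loop is empty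
theorem a_small (n m : Int) (hn : n ≤ 1) (hm : 1 ≤ m) : is_factovisor n m = false := by
  rw [is_factovisor, if_neg (by omega : ¬ m < n),
    PySem.List.pyRange_one_eq_nil (by omega : n + 1 ≤ 2)]
  rfl

-- B on m ≤ 0: the trial loop gets no fuel to run (p*p ≤ rem fails at once) and 'rem ≤ 1' holds
theorem alt_nonpos (n m : Int) (hm : m ≤ 0) : is_factovisor_alt n m = true := by
  unfold is_factovisor_alt trialB
  rw [show ((m + 2 - 2).toNat) = 0 from by omega, trialLoop]
  simp
  omega

-- ===== VERDICT (by name: the statement is the Claim_ definition above) =====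
theorem is_factovisor_spec : Claim_unchanged_is_factovisor := by
  unfold Claim_unchanged_is_factovisor
  intro n m hDom hPre hnD
  by_cases hm : 1 ≤ m
  case neg =>
    -- m ≤ 0 inside Pre_ means m < n: both sides return True
    have hmn : m < n := by
      rcases hPre with h | h
      · omega
      · exact h
    rw [is_factovisor, if_pos hmn, alt_nonpos n m (by omega)]
  case pos =>
  have hBiff := alt_iff n m hm
  by_cases hn2 : 2 ≤ n
  · by_cases hmn : m < n
    · -- fast path: 1 ≤ m < n, so m divides n!
      rw [is_factovisor, if_pos hmn]
      symm
      rw [hBiff]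
      exact Nat.dvd_factorial (by omega) (by omega)
    · have hnm : n ≤ m := by omega
      have hAiff := a_iff n m hn2 hnm
      have hne : m ≠ pyFact n := by
        by_cases h12 : n ≤ 12
        · intro hc
          exact hnD (Or.inr ⟨hn2, h12, hc⟩)
        · -- n ≥ 13: within Dom, m ≤ 2^31 < 13! ≤ n!
          intro hc
          have hDm : m ≤ 2147483648 := by
            have := hDom
            simp only [Dom_is_factovisor, pvDomInt, Bool.and_eq_true, decide_eq_true_iff] at this
            exact this.2.2
          have h13 : pyFact 13 ≤ pyFact n := pyFact_mono 13 n (by omega)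
          have hval : pyFact 13 = 6227020800 := by
            unfold pyFact
            norm_num [show ((13:Int)).toNat = 13 from rfl]
          omega
      have hdvd_iff : m ∣ pyFact n ↔ m.toNat ∣ Nat.factorial n.toNat := by
        unfold pyFact
        constructor
        · intro hd
          have h1 : ((m.toNat : Nat) : Int) ∣ ((Nat.factorial n.toNat : Nat) : Int) := by
            rwa [Int.toNat_of_nonneg (by omega)]
          exact_mod_cast h1
        · intro hd
          have h1 : ((m.toNat : Nat) : Int) ∣ ((Nat.factorial n.toNat : Nat) : Int) := by
            exact_mod_cast hd
          rwa [Int.toNat_of_nonneg (by omega)] at h1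
      rw [Bool.eq_iff_iff, hAiff, hBiff, ← hdvd_iff]
      constructor
      · exact fun h => h.1
      · intro hd
        refine ⟨hd, ?_⟩
        have hle : m ≤ pyFact n := Int.le_of_dvd (pyFact_pos n) hd
        omega
  · -- n ≤ 1: A is False; B is False as well since m ≠ 1 outside D_
    have hm1 : m ≠ 1 := fun hc => hnD (Or.inl ⟨by omega, hc⟩)
    rw [a_small n m (by omega) hm]
    symm
    rw [← Bool.not_eq_true, hBiff, factorial_of_le_one n (by omega), Nat.dvd_one]
    omega

theorem is_factovisor_changed : Claim_changed_is_factovisor := by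
  unfold Claim_changed_is_factovisor
  decide

theorem is_factovisor_tight : Claim_exact_is_factovisor := by
  unfold Claim_exact_is_factovisor
  intro n m hDom hPre hD
  have hm : 1 ≤ m := by
    rcases hD with ⟨_, hm1⟩ | ⟨_, _, hmf⟩
    · omega
    · have := pyFact_pos n; omega
  have hBiff := alt_iff n m hm
  rcases hD with ⟨hn1, hm1⟩ | ⟨hn2, hn12, hmf⟩
  · rw [a_small n m hn1 hm]
    have hB : is_factovisor_alt n m = true := by
      rw [hBiff, hm1]
      exact Nat.one_dvd _
    rw [hB]
    exact Bool.false_ne_true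
  · have hnm : n ≤ m := by
      rw [hmf]
      unfold pyFact
      have := Nat.self_le_factorial n.toNat
      omega
    have hA : is_factovisor n m = false := by
      rw [← Bool.not_eq_true, a_iff n m hn2 hnm, hmf]
      rintro ⟨_, hlt⟩
      omega
    have hB : is_factovisor_alt n m = true := by
      rw [hBiff, hmf]
      unfold pyFact
      simp
    rw [hA, hB]
    exact Bool.false_ne_true
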